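-- pv_equiv track=rewrite | github.com/arturgromenkov/GitRAGEmbedder | src/git-rag-embedder/chunker.py | _split_python_code
-- ===== SOURCE A (Python) =====
-- from typing import List, Dict, Any, Optional, Callable
--
-- def _split_python_code(content: str) -> List[str]:
--     """Split Python code by functions, classes, and imports."""
--     segments = []
--     current_segment = ""
--
--     # Split by major constructs while keeping related blocks together
--     lines = content.split('\n')
--     i = 0
--
--     while i < len(lines):
--         line = lines[i]
--         stripped = line.strip()
--
--         # Check for major constructs (class, def, import, from, decorators)
--         if (stripped.startswith(('def ', 'class ', '@')) or
--             (stripped.startswith(('import ', 'from ')) and ' import ' in stripped)):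
--
--             # Save current segment if not empty
--             if current_segment.strip():
--                 segments.append(current_segment)
--                 current_segment = ""
--
--         current_segment += line + '\n'
--         i += 1
--
--     # Add the final segment
--     if current_segment.strip():
--         segments.append(current_segment)
--
--     return segments if segments else [content]
-- ===== SOURCE B (Python) =====
-- from typing import List
--
-- def _split_python_code(content: str) -> List[str]:
--     """Split Python code by functions, classes, and imports."""
--     lines = content.split('\n')
--
--     def _is_boundary(line):
--         s = line.strip()
--         return s.startswith(('def ', 'class ', '@')) or (
--             s.startswith(('import ', 'from ')) and ' import ' in s)
--
--     bounds = [i for i, l in enumerate(lines) if _is_boundary(l)]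
--     if not any(l.strip() for l in lines):
--         return [content]
--     if bounds and not any(l.strip() for l in lines[:bounds[0]]):
--         bounds[0] = 0          # a blank prefix merges into the first construct
--     else:
--         bounds = [0] + bounds  # the leading chunk is its own segment
--     cuts = bounds + [len(lines)]
--     return ['\n'.join(lines[s:e]) + '\n' for s, e in zip(cuts, cuts[1:])]
-- ===== Notes on version B (the rewrite author's own statement) =====
-- stated objective: alternative
-- what changed: Replaces A's single stateful while-loop (accumulating a current-segment string and flushing it at each boundary) with a two-pass index-then-slice decomposition: first collect the indices of boundary lines, then cut the line list at those indices (merging a blank prefix into the first cut) and join each slice into a segment.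
import Mathlib
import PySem

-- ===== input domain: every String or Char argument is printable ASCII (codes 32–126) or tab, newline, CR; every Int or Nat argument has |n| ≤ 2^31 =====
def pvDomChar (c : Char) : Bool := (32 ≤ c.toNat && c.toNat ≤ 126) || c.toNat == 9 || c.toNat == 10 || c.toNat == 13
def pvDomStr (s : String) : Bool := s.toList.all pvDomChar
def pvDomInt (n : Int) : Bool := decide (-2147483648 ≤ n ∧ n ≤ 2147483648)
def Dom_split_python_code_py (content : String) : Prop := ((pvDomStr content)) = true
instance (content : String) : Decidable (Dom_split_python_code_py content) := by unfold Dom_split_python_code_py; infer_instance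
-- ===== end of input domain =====

-- B replaces A's stateful line-by-line accumulator loop with a two-pass index-then-slice
-- decomposition (collect boundary indices, then cut the line list at those indices); objective: alternative.

-- ===== PORT A =====
-- A's while-loop over lines with state (segments, current_segment); strings handled on List Char.
def pvAloop (lines : List (List Char)) (segs : List (List Char)) (cur : List Char) :
    List (List Char) :=
  match lines with
  | [] => if (PySem.Chars.strip cur).isEmpty then segs else segs ++ [cur]
  | line :: rest =>
    let stripped := PySem.Chars.strip line
    let isB := PySem.Chars.startswith stripped "def ".toList ||
      PySem.Chars.startswith stripped "class ".toList ||
      PySem.Chars.startswith stripped "@".toList ||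
      ((PySem.Chars.startswith stripped "import ".toList ||
        PySem.Chars.startswith stripped "from ".toList) &&
        PySem.Chars.isIn " import ".toList stripped)
    let st := if isB && !(PySem.Chars.strip cur).isEmpty
      then (segs ++ [cur], ([] : List Char)) else (segs, cur)
    pvAloop rest st.1 (st.2 ++ line ++ ['\n'])

def split_python_code_py (content : String) : List String :=
  let lines := PySem.Chars.splitOn content.toList "\n".toList
  let segs := pvAloop lines [] []
  if segs.isEmpty then [content] else segs.map (fun cs => String.ofList cs)

-- ===== PORT B =====
def pvIsBoundary (line : List Char) : Bool :=
  let s := PySem.Chars.strip line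
  PySem.Chars.startswith s "def ".toList || PySem.Chars.startswith s "class ".toList ||
  PySem.Chars.startswith s "@".toList ||
  ((PySem.Chars.startswith s "import ".toList || PySem.Chars.startswith s "from ".toList) &&
    PySem.Chars.isIn " import ".toList s)

def split_python_code_py_alt (content : String) : List String :=
  let lines := PySem.Chars.splitOn content.toList "\n".toList
  let bounds := (PySem.List.enumerate lines).filterMap
    (fun p => if pvIsBoundary p.2 then some p.1 else none)
  if !(lines.any fun l => !(PySem.Chars.strip l).isEmpty) then [content]
  else
    let bounds' : List Int :=
      match bounds with
      | b0 :: rest =>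
        if !((PySem.List.slice lines none (some b0)).any fun l => !(PySem.Chars.strip l).isEmpty)
        then 0 :: rest
        else 0 :: b0 :: rest
      | [] => [0]
    let cuts := bounds' ++ [(lines.length : Int)]
    (cuts.zip cuts.tail).map (fun p =>
      String.ofList (PySem.Chars.join ['\n'] (PySem.List.slice lines (some p.1) (some p.2)) ++ ['\n']))

-- ===== PRECONDITION & SPEC =====
def Spec_split_python_code_py (content : String) (out : List String) : Prop := out = split_python_code_py_alt content
instance (content : String) (out : List String) : Decidable (Spec_split_python_code_py content out) := by unfold Spec_split_python_code_py; infer_instance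

-- ===== CLAIM (what is proved, stated in full; the proofs are below) =====
def Claim_equal_split_python_code_py : Prop := ∀ (content : String), Dom_split_python_code_py content → Spec_split_python_code_py content (split_python_code_py content)

-- ===== LEMMAS AND PROOFS =====

/-- a line (or accumulated segment) is "non-blank" in A's sense: its strip is non-empty -/
def pvOk (cs : List Char) : Bool := !(PySem.Chars.strip cs).isEmpty

/-- the characters a group of lines contributes to a segment: each line followed by '\n' -/
def pvSeg (g : List (List Char)) : List Char := (g.map (· ++ ['\n'])).flatten

/-- split a line list into groups: a (possibly empty) prefix group, then one group per boundary line -/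
def pvGsplit (ls : List (List Char)) : List (List (List Char)) :=
  match ls with
  | [] => [[]]
  | l :: r =>
    match pvGsplit r with
    | [] => []
    | g :: gs => if pvIsBoundary l then [] :: (l :: g) :: gs else (l :: g) :: gs

/-- A's flushing discipline over the group list, starting from accumulated characters c -/
def pvEmit : List Char → List (List (List Char)) → List (List Char)
  | c, [] => if pvOk c then [c] else []
  | c, g :: gs =>
    if pvOk (c ++ pvSeg g) then (c ++ pvSeg g) :: pvEmit [] gs else pvEmit (c ++ pvSeg g) gs

/-- indices of boundary lines -/
def pvBoundsN : List (List Char) → List Nat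
  | [] => []
  | l :: r => if pvIsBoundary l then 0 :: (pvBoundsN r).map (· + 1) else (pvBoundsN r).map (· + 1)

/-- cut positions generated by a group list: 0, |h₀|, |h₀|+|h₁|, …, total -/
def pvCutsL : List (List (List Char)) → List Nat
  | [] => [0]
  | h :: t => 0 :: (pvCutsL t).map (· + h.length)

/-- B's join-slice segments at a list of Nat cut positions -/
def pvSegsOf (lines : List (List Char)) (cuts : List Nat) : List (List Char) :=
  (cuts.zip cuts.tail).map
    (fun p => PySem.Chars.join ['\n'] ((lines.drop p.1).take (p.2 - p.1)) ++ ['\n'])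

-- ---------- pvSeg ----------

theorem pvSeg_nil : pvSeg [] = [] := rfl

theorem pvSeg_cons (l : List Char) (g : List (List Char)) :
    pvSeg (l :: g) = l ++ ['\n'] ++ pvSeg g := by
  simp [pvSeg]

theorem pvSeg_append (g g' : List (List Char)) : pvSeg (g ++ g') = pvSeg g ++ pvSeg g' := by
  simp [pvSeg]

theorem pvSeg_eq_join (h : List (List Char)) (hne : h ≠ []) :
    pvSeg h = PySem.Chars.join ['\n'] h ++ ['\n'] := by
  induction h with
  | nil => exact absurd rfl hne
  | cons l t ih =>
    cases t with
    | nil => simp [pvSeg, PySem.Chars.join_singleton]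
    | cons y t' =>
      rw [PySem.Chars.join_cons_cons, pvSeg_cons, ih (by simp)]
      simp [List.append_assoc]


-- ---------- basic facts about strip / pvOk ----------

theorem pv_strip_eq_nil_iff (cs : List Char) :
    PySem.Chars.strip cs = [] ↔ ∀ c ∈ cs, PySem.Chars.isspace c = true := by
  unfold PySem.Chars.strip PySem.Chars.rstrip PySem.Chars.lstrip
  rw [List.reverse_eq_nil_iff, List.dropWhile_eq_nil_iff]
  simp only [List.mem_reverse]
  constructor
  · intro h c hc
    rcases List.mem_append.1 (by rw [List.takeWhile_append_dropWhile]; exact hc :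
        c ∈ cs.takeWhile PySem.Chars.isspace ++ cs.dropWhile PySem.Chars.isspace) with h1 | h1
    · exact List.mem_takeWhile_imp h1
    · exact h c h1
  · intro h c hc
    exact h c ((List.dropWhile_sublist _).mem hc)

theorem pv_strip_isEmpty (cs : List Char) :
    (PySem.Chars.strip cs).isEmpty = cs.all PySem.Chars.isspace := by
  rcases h : cs.all PySem.Chars.isspace with _ | _
  · simp only [List.all_eq_false] at h
    obtain ⟨c, hc, hs⟩ := h
    simp only [List.isEmpty_eq_false_iff, ne_eq, pv_strip_eq_nil_iff]
    intro hall
    exact absurd (hall c hc) (by simp [hs])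
  · simp only [List.all_eq_true] at h
    simp only [List.isEmpty_iff, pv_strip_eq_nil_iff]
    exact h

theorem pvOk_append (x y : List Char) : pvOk (x ++ y) = (pvOk x || pvOk y) := by
  simp [pvOk, pv_strip_isEmpty, List.all_append, Bool.not_and]

theorem pvOk_newline : pvOk ['\n'] = false := by decide

theorem pvOk_nil : pvOk [] = false := by decide

theorem pv_strip_nil : PySem.Chars.strip [] = [] := rfl

theorem pvOk_seg (g : List (List Char)) : pvOk (pvSeg g) = g.any pvOk := by
  induction g with
  | nil => decide
  | cons l t ih =>
    rw [pvSeg_cons, List.append_assoc, pvOk_append, pvOk_append, pvOk_newline, ih]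
    simp [List.any_cons]

theorem pv_boundary_ok (l : List Char) (h : pvIsBoundary l = true) : pvOk l = true := by
  have key : ∀ p : List Char, p ≠ [] →
      PySem.Chars.startswith (PySem.Chars.strip l) p = true → pvOk l = true := by
    intro p hp hs
    rw [PySem.Chars.startswith_iff] at hs
    have hne : PySem.Chars.strip l ≠ [] := by
      intro hnil
      rw [hnil] at hs
      exact hp (List.prefix_nil.mp hs)
    simp [pvOk, List.isEmpty_eq_false_iff, hne]
  unfold pvIsBoundary at h
  simp only [Bool.or_eq_true, Bool.and_eq_true] at h
  rcases h with ((h | h) | h) | ⟨h | h, _⟩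
  · exact key _ (by decide) h
  · exact key _ (by decide) h
  · exact key _ (by decide) h
  · exact key _ (by decide) h
  · exact key _ (by decide) h

-- ---------- pvGsplit ----------

theorem pvGsplit_ne_nil (ls : List (List Char)) : pvGsplit ls ≠ [] := by
  induction ls with
  | nil => simp [pvGsplit]
  | cons l r ih =>
    rcases hr : pvGsplit r with _ | ⟨g, gs⟩
    · exact absurd hr ih
    · simp only [pvGsplit, hr]
      split <;> simp

theorem pvGsplit_flatten (ls : List (List Char)) : (pvGsplit ls).flatten = ls := by
  induction ls with
  | nil => simp [pvGsplit]
  | cons l r ih =>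
    rcases hr : pvGsplit r with _ | ⟨g, gs⟩
    · exact absurd hr (pvGsplit_ne_nil r)
    · rw [hr] at ih
      simp only [pvGsplit, hr]
      split <;> simp_all

/-- every group after the first starts with a boundary line -/
theorem pvGsplit_tail_head (ls : List (List Char)) :
    ∀ h ∈ (pvGsplit ls).tail, ∃ b t, h = b :: t ∧ pvIsBoundary b = true := by
  induction ls with
  | nil => simp [pvGsplit]
  | cons l r ih =>
    rcases hr : pvGsplit r with _ | ⟨g, gs⟩
    · exact absurd hr (pvGsplit_ne_nil r)
    · rw [hr] at ih
      simp only [pvGsplit, hr]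
      by_cases hb : pvIsBoundary l
      · simp only [hb, if_pos]
        intro h hm
        rcases List.mem_cons.1 hm with rfl | hm
        · exact ⟨l, g, rfl, hb⟩
        · exact ih h hm
      · simp only [hb, if_neg, Bool.false_eq_true, not_false_iff]
        intro h hm
        exact ih h hm

theorem pvGsplit_tail_ok (ls : List (List Char)) :
    ∀ h ∈ (pvGsplit ls).tail, pvOk (pvSeg h) = true ∧ h ≠ [] := by
  intro h hm
  obtain ⟨b, t, rfl, hb⟩ := pvGsplit_tail_head ls h hm
  refine ⟨?_, by simp⟩
  rw [pvOk_seg, List.any_cons, pv_boundary_ok b hb, Bool.true_or]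

-- ---------- pvEmit ----------

theorem pvEmit_cons_line (c l : List Char) (g : List (List Char)) (gs : List (List (List Char))) :
    pvEmit c ((l :: g) :: gs) = pvEmit (c ++ l ++ ['\n']) (g :: gs) := by
  simp [pvEmit, pvSeg_cons]

theorem pvEmit_merge (g g' : List (List Char)) (gs : List (List (List Char))) :
    pvEmit (pvSeg g) (g' :: gs) = pvEmit [] ((g ++ g') :: gs) := by
  simp [pvEmit, pvSeg_append]

theorem pvEmit_map (tl : List (List (List Char))) (h0 : List (List Char)) (c : List Char)
    (hh : pvOk (c ++ pvSeg h0) = true) (ht : ∀ g ∈ tl, pvOk (pvSeg g) = true) :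
    pvEmit c (h0 :: tl) = (c ++ pvSeg h0) :: tl.map pvSeg := by
  induction tl generalizing h0 c with
  | nil => simp [pvEmit, hh, pvOk_nil]
  | cons g tr ih =>
    rw [pvEmit, if_pos hh, ih g [] (by simpa using ht g (by simp)) (fun x hx => ht x (by simp [hx]))]
    simp

theorem pvEmit_eq_nil_iff (hs : List (List (List Char))) (c : List Char) :
    pvEmit c hs = [] ↔ pvOk (c ++ pvSeg hs.flatten) = false := by
  induction hs generalizing c with
  | nil =>
    simp only [pvEmit, List.flatten_nil, pvSeg_nil, List.append_nil]
    split <;> simp_all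
  | cons g gs ih =>
    rw [pvEmit]
    by_cases hok : pvOk (c ++ pvSeg g) = true
    · rw [if_pos hok]
      simp only [List.flatten_cons, pvSeg_append, ← List.append_assoc, pvOk_append, hok]
      simp
    · rw [if_neg hok, ih]
      simp [List.flatten_cons, pvSeg_append, List.append_assoc]

-- ---------- A's loop in terms of pvEmit ----------

theorem pvAloop_emit (ls : List (List Char)) (segs : List (List Char)) (cur : List Char) :
    pvAloop ls segs cur = segs ++ pvEmit cur (pvGsplit ls) := by
  induction ls generalizing segs cur with
  | nil =>
    show (if (PySem.Chars.strip cur).isEmpty then segs else segs ++ [cur]) = _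
    have : pvGsplit [] = [[]] := rfl
    rw [this]
    rcases hc : pvOk cur with _ | _ <;>
      simp_all [pvEmit, pvSeg, pvOk, Bool.not_eq_eq_eq_not, pv_strip_nil]
  | cons l r ih =>
    have hstep : pvAloop (l :: r) segs cur =
        pvAloop r (if pvIsBoundary l && pvOk cur then segs ++ [cur] else segs)
          ((if pvIsBoundary l && pvOk cur then [] else cur) ++ l ++ ['\n']) := by
      show pvAloop r
          (if pvIsBoundary l && pvOk cur then (segs ++ [cur], ([] : List Char)) else (segs, cur)).1
          ((if pvIsBoundary l && pvOk cur then (segs ++ [cur], ([] : List Char)) else (segs, cur)).2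
            ++ l ++ ['\n']) = _
      split <;> rfl
    rcases hr : pvGsplit r with _ | ⟨g, gs⟩
    · exact absurd hr (pvGsplit_ne_nil r)
    · by_cases hb : pvIsBoundary l
      · have hg : pvGsplit (l :: r) = [] :: (l :: g) :: gs := by
          simp [pvGsplit, hr, hb]
        by_cases hc : pvOk cur
        · rw [hstep, hb, hc, Bool.true_and, if_pos rfl, ih, hr, hg]
          have : pvEmit cur ([] :: (l :: g) :: gs) = cur :: pvEmit [] ((l :: g) :: gs) := by
            rw [pvEmit]
            simp [pvSeg_nil, hc]
          rw [this, pvEmit_cons_line]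
          simp
        · rw [hstep, hb, Bool.true_and, if_neg (by simp [hc]), ih, hr, hg]
          have : pvEmit cur ([] :: (l :: g) :: gs) = pvEmit cur ((l :: g) :: gs) := by
            rw [pvEmit]
            simp only [pvSeg_nil, List.append_nil]
            rw [if_neg hc]
          rw [this, pvEmit_cons_line, if_neg hc]
      · simp only [Bool.not_eq_true] at hb
        have hg : pvGsplit (l :: r) = (l :: g) :: gs := by
          simp [pvGsplit, hr, hb]
        rw [hstep, hb, Bool.false_and, if_neg (by simp), if_neg (by simp), ih, hr, hg,
          pvEmit_cons_line]

-- ---------- bounds vs groups ----------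

theorem pv_map_add_add (xs : List Nat) (a b : Nat) :
    (xs.map (· + a)).map (· + b) = xs.map (· + (a + b)) := by
  rw [List.map_map]
  apply List.map_congr_left
  intro x _
  simp only [Function.comp_apply]
  omega

theorem pvBoundsN_cutsL (ls : List (List Char)) (g0 : List (List Char))
    (gs : List (List (List Char))) (h : pvGsplit ls = g0 :: gs) :
    pvBoundsN ls ++ [ls.length] = (pvCutsL gs).map (· + g0.length) := by
  induction ls generalizing g0 gs with
  | nil =>
    have : pvGsplit ([] : List (List Char)) = [[]] := rfl
    rw [this] at h
    injection h with h1 h2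
    subst h1; subst h2
    simp [pvBoundsN, pvCutsL]
  | cons l r ih =>
    rcases hr : pvGsplit r with _ | ⟨g, gs'⟩
    · exact absurd hr (pvGsplit_ne_nil r)
    · have ihg := ih g gs' hr
      by_cases hb : pvIsBoundary l
      · have hg : pvGsplit (l :: r) = [] :: (l :: g) :: gs' := by simp [pvGsplit, hr, hb]
        rw [hg] at h
        injection h with h1 h2
        subst h1; subst h2
        rw [show pvBoundsN (l :: r) = 0 :: (pvBoundsN r).map (· + 1) from by
            rw [pvBoundsN, if_pos hb],
          List.length_cons, List.length_nil]
        have : (pvBoundsN r).map (· + 1) ++ [r.length + 1]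
            = ((pvBoundsN r ++ [r.length]).map (· + 1)) := by simp
        rw [List.cons_append, this, ihg, pv_map_add_add, pvCutsL]
        simp
      · simp only [Bool.not_eq_true] at hb
        have hg : pvGsplit (l :: r) = (l :: g) :: gs' := by simp [pvGsplit, hr, hb]
        rw [hg] at h
        injection h with h1 h2
        subst h1; subst h2
        rw [show pvBoundsN (l :: r) = (pvBoundsN r).map (· + 1) from by
            rw [pvBoundsN, if_neg (by simp [hb])],
          List.length_cons]
        have : (pvBoundsN r).map (· + 1) ++ [r.length + 1]
            = ((pvBoundsN r ++ [r.length]).map (· + 1)) := by simp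
        rw [this, ihg, pv_map_add_add]
        simp

theorem pvCutsL_length (hs : List (List (List Char))) : (pvCutsL hs).length = hs.length + 1 := by
  induction hs with
  | nil => rfl
  | cons h t ih => simp [pvCutsL, ih]

-- ---------- slices vs groups ----------

theorem pvSegsOf_cons (lines : List (List Char)) (x y : Nat) (zs : List Nat) :
    pvSegsOf lines (x :: y :: zs) =
      (PySem.Chars.join ['\n'] ((lines.drop x).take (y - x)) ++ ['\n']) :: pvSegsOf lines (y :: zs) := by
  simp [pvSegsOf]

theorem pvSegsOf_shift (front rest : List (List Char)) (cuts : List Nat) :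
    pvSegsOf (front ++ rest) (cuts.map (· + front.length)) = pvSegsOf rest cuts := by
  unfold pvSegsOf
  rw [← List.map_tail, List.zip_map, List.map_map]
  apply List.map_congr_left
  rintro ⟨s, e⟩ _
  simp only [Function.comp_apply, Prod.map_apply]
  have h1 : (front ++ rest).drop (s + front.length) = rest.drop s := by
    rw [List.drop_append]
    have : front.drop (s + front.length) = [] := by
      rw [List.drop_eq_nil_iff]
      omega
    rw [this]
    simp only [List.nil_append]
    congr 1
    omega
  rw [h1]
  have h2 : e + front.length - (s + front.length) = e - s := by omega
  rw [h2]

theorem pvSegsOf_cutsL (hs : List (List (List Char))) :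
    pvSegsOf hs.flatten (pvCutsL hs) = hs.map (fun h => PySem.Chars.join ['\n'] h ++ ['\n']) := by
  induction hs with
  | nil => simp [pvSegsOf, pvCutsL]
  | cons h t ih =>
    have hhead : ∃ tl, pvCutsL t = 0 :: tl := by
      cases t <;> exact ⟨_, rfl⟩
    obtain ⟨tl, htl⟩ := hhead
    have hcuts : pvCutsL (h :: t) = 0 :: h.length :: tl.map (· + h.length) := by
      rw [pvCutsL, htl]
      simp
    rw [hcuts, List.flatten_cons, pvSegsOf_cons]
    congr 1
    · congr 2
      rw [List.drop_zero, Nat.sub_zero, List.take_left]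
    · have : (h.length : Nat) :: tl.map (· + h.length) = (0 :: tl).map (· + h.length) := by simp
      rw [this, pvSegsOf_shift, ← htl, ih]

-- ---------- enumerate/filterMap = pvBoundsN ----------

theorem pv_enum_bounds (ls : List (List Char)) (k : Int) :
    (PySem.List.enumerate ls k).filterMap (fun p => if pvIsBoundary p.2 then some p.1 else none)
      = (pvBoundsN ls).map (fun n : Nat => (n : Int) + k) := by
  induction ls generalizing k with
  | nil => simp [PySem.List.enumerate, pvBoundsN]
  | cons l r ih =>
    have henum : PySem.List.enumerate (l :: r) k = (k, l) :: PySem.List.enumerate r (k + 1) := by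
      simp [PySem.List.enumerate]
    rw [henum]
    by_cases hb : pvIsBoundary l
    · rw [List.filterMap_cons_some (b := k) (by simp [hb]), ih (k + 1),
        show pvBoundsN (l :: r) = 0 :: (pvBoundsN r).map (· + 1) from by
          rw [pvBoundsN, if_pos hb],
        List.map_cons, List.map_map]
      simp only [Nat.cast_zero, zero_add]
      congr 1
      apply List.map_congr_left
      intro x _
      simp only [Function.comp_apply]
      push_cast
      ring
    · simp only [Bool.not_eq_true] at hb
      rw [List.filterMap_cons_none (by simp [hb]), ih (k + 1),
        show pvBoundsN (l :: r) = (pvBoundsN r).map (· + 1) from by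
          rw [pvBoundsN, if_neg (by simp [hb])],
        List.map_map]
      apply List.map_congr_left
      intro x _
      simp only [Function.comp_apply]
      push_cast
      ring

-- ---------- the core equality over an arbitrary line list ----------

theorem pv_core (lines : List (List Char)) (hany : lines.any pvOk = true) :
    pvSegsOf lines
        ((match pvBoundsN lines with
          | [] => [0]
          | b0 :: rest =>
            if !((lines.take b0).any pvOk) then 0 :: rest else 0 :: b0 :: rest) ++ [lines.length])
      = pvEmit [] (pvGsplit lines) := by
  have hlne : lines ≠ [] := by
    intro h
    rw [h] at hany
    simp at hany
  rcases hg : pvGsplit lines with _ | ⟨g0, gs⟩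
  · exact absurd hg (pvGsplit_ne_nil lines)
  have hbc := pvBoundsN_cutsL lines g0 gs hg
  have hflat : (g0 :: gs).flatten = lines := by rw [← hg, pvGsplit_flatten]
  rcases hbn : pvBoundsN lines with _ | ⟨b0, rest⟩
  · -- no boundary lines: a single group
    rw [hbn, List.nil_append] at hbc
    have hgs : gs = [] := by
      have hlen := congrArg List.length hbc
      simp only [List.length_cons, List.length_nil, List.length_map, pvCutsL_length] at hlen
      exact List.eq_nil_of_length_eq_zero (by omega)
    subst hgs
    have hg0 : g0 = lines := by simpa using hflat
    subst hg0
    have hemit : pvEmit [] [g0] = [pvSeg g0] := by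
      rw [pvEmit, if_pos (by simpa [pvOk_seg] using hany)]
      simp [pvEmit, pvOk_nil]
    rw [hemit, pvSeg_eq_join g0 hlne]
    simp [pvSegsOf, List.take_of_length_le (le_refl g0.length)]
  · -- at least one boundary line
    rw [hbn] at hbc
    rcases hgs : gs with _ | ⟨g1, gs'⟩
    · exfalso
      rw [hgs] at hbc
      have hlen := congrArg List.length hbc
      simp [pvCutsL] at hlen
    subst hgs
    rw [pvCutsL, List.map_cons, zero_add, List.cons_append] at hbc
    obtain ⟨hb0, h2⟩ := List.cons_eq_cons.mp hbc
    have htl : rest ++ [lines.length] = (pvCutsL gs').map (· + (g0.length + g1.length)) := by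
      rw [h2, pv_map_add_add, Nat.add_comm g1.length g0.length]
    have htake : lines.take b0 = g0 := by
      rw [hb0, ← hflat, List.flatten_cons, List.take_left]
    have htail_ok : ∀ g ∈ g1 :: gs', pvOk (pvSeg g) = true ∧ g ≠ [] := by
      have h := pvGsplit_tail_ok lines
      rw [hg] at h
      exact fun g hm => h g (by simpa using hm)
    have hcuts : pvCutsL (g0 :: g1 :: gs') = 0 :: b0 :: (rest ++ [lines.length]) := by
      rw [pvCutsL, pvCutsL]
      simp only [List.map_cons, zero_add]
      rw [← h2, ← hb0]
    have hpok : (lines.take b0).any pvOk = pvOk (pvSeg g0) := by rw [htake, pvOk_seg]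
    show pvSegsOf lines
        ((if !((lines.take b0).any pvOk) then 0 :: rest else 0 :: b0 :: rest) ++ [lines.length])
      = pvEmit [] (g0 :: g1 :: gs')
    by_cases hpre : pvOk (pvSeg g0) = true
    · -- the prefix group contains code: it is its own segment
      rw [if_neg (by simp [hpok, hpre])]
      have hg0ne : g0 ≠ [] := by
        intro h0
        rw [h0, pvSeg_nil, pvOk_nil] at hpre
        exact absurd hpre (by simp)
      have hL : (0 :: b0 :: rest) ++ [lines.length] = pvCutsL (g0 :: g1 :: gs') := by
        rw [hcuts]; simp
      rw [hL, ← hflat, pvSegsOf_cutsL,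
        pvEmit_map (g1 :: gs') g0 [] (by simpa using hpre) (fun g hm => (htail_ok g hm).1)]
      simp only [List.nil_append, List.map_cons]
      congr 1
      · exact (pvSeg_eq_join g0 hg0ne).symm
      · congr 1
        · exact (pvSeg_eq_join g1 (htail_ok g1 (by simp)).2).symm
        · apply List.map_congr_left
          intro g hm
          exact (pvSeg_eq_join g (htail_ok g (by simp [hm])).2).symm
    · -- the prefix group is blank: it merges into the first boundary group
      rw [if_pos (by simp [hpok, hpre])]
      have hmerge_cuts : (0 :: rest) ++ [lines.length] = pvCutsL ((g0 ++ g1) :: gs') := by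
        rw [pvCutsL, List.cons_append, htl, List.length_append]
      have hmerge_flat : ((g0 ++ g1) :: gs').flatten = lines := by
        rw [← hflat]
        simp
      rw [hmerge_cuts, ← hmerge_flat, pvSegsOf_cutsL]
      have hok1 : pvOk (pvSeg (g0 ++ g1)) = true := by
        rw [pvSeg_append, pvOk_append, (htail_ok g1 (by simp)).1, Bool.or_true]
      have hemit : pvEmit [] (g0 :: g1 :: gs') = pvSeg (g0 ++ g1) :: gs'.map pvSeg := by
        rw [pvEmit, if_neg (by simpa using hpre), List.nil_append, pvEmit_merge,
          pvEmit_map gs' (g0 ++ g1) [] (by simpa using hok1)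
            (fun g hm => (htail_ok g (by simp [hm])).1), List.nil_append]
      rw [hemit, List.map_cons]
      congr 1
      · exact (pvSeg_eq_join (g0 ++ g1) (by
          intro h0
          rw [h0] at hok1
          rw [pvSeg_nil, pvOk_nil] at hok1
          exact absurd hok1 (by simp))).symm
      · apply List.map_congr_left
        intro g hm
        exact (pvSeg_eq_join g (htail_ok g (by simp [hm])).2).symm


theorem pvB_cast (lines : List (List Char)) (cutsN : List Nat) :
    (((cutsN.map (fun n : Nat => (n : Int))).zip
        (cutsN.map (fun n : Nat => (n : Int))).tail).map (fun p =>
      String.ofList (PySem.Chars.join ['\n'] (PySem.List.slice lines (some p.1) (some p.2))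
        ++ ['\n'])))
      = (pvSegsOf lines cutsN).map String.ofList := by
  unfold pvSegsOf
  rw [← List.map_tail, List.zip_map, List.map_map, List.map_map]
  apply List.map_congr_left
  rintro ⟨s, e⟩ _
  simp only [Function.comp_apply, Prod.map_apply]
  rw [PySem.List.slice_natCast]

theorem pvEmit_gsplit_ne_nil (lines : List (List Char)) (hany : lines.any pvOk = true) :
    pvEmit [] (pvGsplit lines) ≠ [] := by
  intro h
  rw [pvEmit_eq_nil_iff, List.nil_append, pvGsplit_flatten, pvOk_seg, hany] at h
  exact absurd h (by simp)

-- ===== VERDICT (by name: the statement is the Claim_ definition above) =====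
theorem split_python_code_py_spec : Claim_equal_split_python_code_py := by
  intro content _
  unfold Spec_split_python_code_py split_python_code_py split_python_code_py_alt
  simp only []
  set lines := PySem.Chars.splitOn content.toList "\n".toList with hlines
  rw [pvAloop_emit, List.nil_append]
  by_cases hany : lines.any pvOk = true
  · have hanyf : (lines.any fun l => !(PySem.Chars.strip l).isEmpty) = true := hany
    rw [if_neg (by
        simp only [List.isEmpty_iff]
        exact pvEmit_gsplit_ne_nil lines hany),
      if_neg (by simp [hanyf])]
    rw [pv_enum_bounds]
    have hcast0 : (fun n : Nat => (n : Int) + 0) = (fun n : Nat => (n : Int)) := by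
      funext n
      ring
    rw [hcast0]
    rcases hbn : pvBoundsN lines with _ | ⟨b0, rest⟩
    · -- no boundary lines
      simp only [List.map_nil]
      have hcuts : ([(0 : Int)] ++ [(lines.length : Int)])
          = (([0] ++ [lines.length]) : List Nat).map (fun n : Nat => (n : Int)) := by simp
      rw [hcuts, pvB_cast]
      have hc := pv_core lines hany
      rw [hbn] at hc
      have hc2 : pvSegsOf lines ([0] ++ [lines.length]) = pvEmit [] (pvGsplit lines) := hc
      rw [hc2]
    · -- at least one boundary line
      simp only [List.map_cons]
      have hslice : PySem.List.slice lines none (some ((b0 : Nat) : Int)) = lines.take b0 := by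
        rw [PySem.List.slice_to lines (by positivity)]
        simp
      rw [hslice]
      have hpred : (fun l => !(PySem.Chars.strip l).isEmpty) = pvOk := rfl
      rw [hpred]
      have hc := pv_core lines hany
      rw [hbn] at hc
      have hc2 : pvSegsOf lines
          ((if !((lines.take b0).any pvOk) then 0 :: rest else 0 :: b0 :: rest)
            ++ [lines.length]) = pvEmit [] (pvGsplit lines) := hc
      by_cases hpre : (lines.take b0).any pvOk = true
      · rw [if_neg (by simp [hpre])]
        rw [if_neg (by simp [hpre])] at hc2
        have hcuts : ((0 : Int) :: (b0 : Int) :: rest.map (fun n : Nat => (n : Int)))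
              ++ [(lines.length : Int)]
            = ((0 :: b0 :: rest) ++ [lines.length]).map (fun n : Nat => (n : Int)) := by
          simp
        rw [hcuts, pvB_cast, hc2]
      · rw [if_pos (by simp [hpre])]
        rw [if_pos (by simp [hpre])] at hc2
        have hcuts : ((0 : Int) :: rest.map (fun n : Nat => (n : Int)))
              ++ [(lines.length : Int)]
            = ((0 :: rest) ++ [lines.length]).map (fun n : Nat => (n : Int)) := by
          simp
        rw [hcuts, pvB_cast, hc2]
  · rw [if_pos (by
        simp only [List.isEmpty_iff]
        rw [pvEmit_eq_nil_iff, List.nil_append, pvGsplit_flatten, pvOk_seg]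
        simpa using hany),
      if_pos (by
        have hanyf : (lines.any fun l => !(PySem.Chars.strip l).isEmpty) = false := by
          have : lines.any pvOk = false := by simpa using hany
          exact this
        simp [hanyf])]
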